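-- pv_equiv track=rewrite | github.com/Phong142/CTF_Solved_RE | w3challs/protectionsystem_ii.py | verify_login
-- ===== SOURCE A (Python) =====
-- def verify_login(login):
--     ret = ord(login[0])
--     for j in range(len(login) - 1):
--         if j % 2 == 1:
--             ret = ret - ord(login[j + 1])
--
--         else:
--             ret = ret + ord(login[j + 1])
--
--     return ret
-- ===== SOURCE B (Python) =====
-- def verify_login(login):
--     # grouped slice passes: odd indices are added, even indices >= 2 subtracted
--     ret = ord(login[0])
--     ret += sum(ord(c) for c in login[1::2])
--     ret -= sum(ord(c) for c in login[2::2])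
--     return ret
-- ===== Notes on version B (the rewrite author's own statement) =====
-- stated objective: simpler
-- what changed: Replaced the index loop with its parity branch by two grouped slice passes: add the sum of codes at odd indices (login[1::2]) and subtract the sum at even indices >= 2 (login[2::2]).
import Mathlib
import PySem

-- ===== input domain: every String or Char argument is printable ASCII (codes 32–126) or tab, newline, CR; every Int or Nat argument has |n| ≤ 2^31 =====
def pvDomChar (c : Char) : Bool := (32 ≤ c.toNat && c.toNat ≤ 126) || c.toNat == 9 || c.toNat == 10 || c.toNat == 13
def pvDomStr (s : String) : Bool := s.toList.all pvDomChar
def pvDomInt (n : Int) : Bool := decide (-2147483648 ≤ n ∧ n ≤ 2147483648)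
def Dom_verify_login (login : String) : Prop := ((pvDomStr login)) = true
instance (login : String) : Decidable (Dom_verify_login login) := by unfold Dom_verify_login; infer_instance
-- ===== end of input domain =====

-- B replaces the single index loop with its parity branch by two grouped slice passes
-- (add codes at odd indices, subtract codes at even indices ≥ 2); same cost, simpler shape.

-- ===== PORT A =====
-- ord(login[j]) for an index known to be in range inside A's loop (none is unreachable there)
def ordAtA (login : String) (i : Int) : Int :=
  match PySem.Str.pyGet? login i with
  | some c => (c.toNat : Int)
  | none => 0

def verify_login (login : String) : Int :=
  match PySem.Str.pyGet? login 0 with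
  | none => 0  -- ord(login[0]) raises IndexError on the empty string; excluded by Pre_
  | some c0 =>
    (PySem.List.pyRange 0 (PySem.Str.len login - 1) 1).foldl
      (fun ret j =>
        if PySem.Int.mod j 2 = 1 then
          ret - ordAtA login (j + 1)
        else
          ret + ordAtA login (j + 1))
      ((c0.toNat : Int))

-- ===== PORT B =====
def verify_login_alt (login : String) : Int :=
  match PySem.Str.pyGet? login 0 with
  | none => 0  -- ord(login[0]) raises IndexError on the empty string; excluded by Pre_
  | some c0 =>
    -- login[1::2] and login[2::2]; step 2 ≠ 0, so slice? is never none
    let odds := (PySem.Chars.slice? login.toList (some 1) none 2).getD []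
    let evens := (PySem.Chars.slice? login.toList (some 2) none 2).getD []
    (c0.toNat : Int) + (odds.map (fun c => (c.toNat : Int))).sum
      - (evens.map (fun c => (c.toNat : Int))).sum

-- ===== PRECONDITION & SPEC =====
-- Pre_ excludes exactly the empty string, on which A (and B) raise IndexError at ord(login[0]).
def Pre_verify_login (login : String) : Prop := login.toList ≠ []
instance (login : String) : Decidable (Pre_verify_login login) := by unfold Pre_verify_login; infer_instance

def pvWitness_verify_login : String := "ab"

def Spec_verify_login (login : String) (out : Int) : Prop := out = verify_login_alt login
instance (login : String) (out : Int) : Decidable (Spec_verify_login login out) := by unfold Spec_verify_login; infer_instance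

-- ===== CLAIM (what is proved, stated in full; the proofs are below) =====
def Claim_equal_verify_login : Prop := ∀ (login : String), Dom_verify_login login → Pre_verify_login login → Spec_verify_login login (verify_login login)

-- ===== LEMMAS AND PROOFS =====

-- codes of a list of chars
def pvCode (c : Char) : Int := (c.toNat : Int)

-- alternating sum (+ - + - …) of a list of ints
def pvAltsum : List Int → Int
  | [] => 0
  | x :: r => x - pvAltsum r

-- every other element, starting with the head
def pvEo {α : Type} : List α → List α
  | [] => []
  | [x] => [x]
  | x :: _ :: t => x :: pvEo t

theorem pvEo_cons {α : Type} (a : α) (t : List α) : pvEo (a :: t) = a :: pvEo t.tail := by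
  cases t <;> rfl

theorem pvEo_filterMap {α : Type} (m : List α) :
    (List.range ((m.length + 1) / 2)).filterMap (fun k => m[2 * k]?) = pvEo m := by
  induction m using pvEo.induct with
  | case1 => simp [pvEo]
  | case2 x => simp [pvEo, List.range_one]
  | case3 x y t ih =>
    have hlen : (((x :: y :: t).length + 1) / 2) = ((t.length + 1) / 2) + 1 := by
      simp [List.length_cons]; omega
    rw [hlen, List.range_succ_eq_map, List.filterMap_cons, List.filterMap_map]
    simp only [Nat.mul_zero, List.getElem?_cons_zero]
    have : (fun k => (x :: y :: t)[2 * k]?) ∘ Nat.succ = fun k => t[2 * k]? := by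
      funext k
      simp only [Function.comp]
      have h2 : 2 * (k + 1) = 2 * k + 1 + 1 := by omega
      simp [Nat.succ_eq_add_one, h2]
    rw [this, ih]
    rfl

-- slice with step 2 from a natural start is every-other of the drop
theorem pvSlice2 {α : Type} (l : List α) (a : Nat) :
    PySem.List.slice? l (some (a : Int)) none 2 = some (pvEo (l.drop a)) := by
  have ha : ¬ ((a : Int) < 0) := by omega
  simp only [PySem.List.slice?, PySem.List.sliceIndices, if_neg ha]
  norm_num
  by_cases hna : l.length ≤ a
  · have h1 : min (a : Int) (l.length : Int) = (l.length : Int) := by omega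
    rw [h1, if_neg (by omega)]
    simp [List.drop_eq_nil_of_le hna, pvEo]
  · have h1 : min (a : Int) (l.length : Int) = (a : Int) := by omega
    rw [h1, if_pos (by omega)]
    have hcnt : (((l.length : Int) - a + 2 - 1) / 2).toNat = ((l.drop a).length + 1) / 2 := by
      rw [List.length_drop]
      omega
    rw [hcnt, ← pvEo_filterMap]
    congr 1
    funext k
    have hidx : ((a : Int) + 2 * (k : Int)).toNat = a + 2 * k := by omega
    rw [hidx, ← List.getElem?_drop]

-- sum of the parity-signed terms over an enumeration, for any start index
theorem pvEnumSum (xs : List Char) (s : Int) :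
    (((PySem.List.enumerate xs s).map
        (fun p => if PySem.Int.mod p.1 2 = 1 then -pvCode p.2 else pvCode p.2)).sum)
      = (if PySem.Int.mod s 2 = 1 then -1 else 1) * pvAltsum (xs.map pvCode) := by
  induction xs generalizing s with
  | nil => simp [PySem.List.enumerate_nil, pvAltsum]
  | cons x t ih =>
    have e1 : PySem.Int.mod s 2 = s % 2 := PySem.Int.mod_eq_emod_of_pos (by omega)
    have e2 : PySem.Int.mod (s + 1) 2 = (s + 1) % 2 := PySem.Int.mod_eq_emod_of_pos (by omega)
    rw [PySem.List.enumerate_cons]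
    simp only [List.map_cons, List.sum_cons, ih (s + 1), e1, e2, pvAltsum]
    rcases Int.emod_two_eq_zero_or_one s with h | h
    · have h2 : (s + 1) % 2 = 1 := by omega
      rw [h, h2]
      norm_num
      ring
    · have h2 : (s + 1) % 2 = 0 := by omega
      rw [h, h2]
      norm_num
      ring

-- every-other sums differ by the alternating sum
theorem pvEoSum (m : List Char) :
    ((pvEo m).map pvCode).sum - ((pvEo m.tail).map pvCode).sum = pvAltsum (m.map pvCode) := by
  induction m using pvEo.induct with
  | case1 => simp [pvEo, pvAltsum]
  | case2 x => simp [pvEo, pvAltsum]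
  | case3 x y t ih =>
    have h1 : pvEo (x :: y :: t) = x :: pvEo t := rfl
    have h2 : (x :: y :: t).tail = y :: t := rfl
    have h3 : pvEo (y :: t) = y :: pvEo t.tail := pvEo_cons y t
    rw [h1, h2, h3]
    simp only [List.map_cons, List.sum_cons, pvAltsum]
    have := ih
    linarith [ih]

-- ===== VERDICT (by name: the statement is the Claim_ definition above) =====
theorem verify_login_spec : Claim_equal_verify_login := by
  intro login _ hpre
  unfold Spec_verify_login verify_login verify_login_alt
  obtain ⟨c0, t, hlt⟩ : ∃ c0 t, login.toList = c0 :: t := by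
    cases h : login.toList with
    | nil => exact absurd h hpre
    | cons a b => exact ⟨a, b, rfl⟩
  have hget : PySem.Str.pyGet? login 0 = some c0 := by
    rw [show ((0 : Int)) = ((0 : Nat) : Int) by rfl, PySem.Str.pyGet?_natCast, hlt]
    rfl
  rw [hget]
  -- B side: identify the slices
  have hs1 : PySem.Chars.slice? login.toList (some 1) none 2 = some (pvEo t) := by
    show PySem.List.slice? login.toList (some ((1 : Nat) : Int)) none 2 = _
    rw [pvSlice2 login.toList 1, hlt]
    rfl
  have hs2 : PySem.Chars.slice? login.toList (some 2) none 2 = some (pvEo t.tail) := by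
    show PySem.List.slice? login.toList (some ((2 : Nat) : Int)) none 2 = _
    rw [pvSlice2 login.toList 2, hlt]
    cases t <;> rfl
  rw [hs1, hs2]
  simp only [Option.getD_some]
  -- A side: rewrite the loop body to an additive fold and sum it
  have hlen : PySem.Str.len login - 1 = (t.length : Int) := by
    rw [PySem.Str.len_eq, hlt]
    simp
  have hbody :
      (PySem.List.pyRange 0 (PySem.Str.len login - 1) 1).foldl
        (fun ret j => if PySem.Int.mod j 2 = 1 then ret - ordAtA login (j + 1)
                      else ret + ordAtA login (j + 1)) ((c0.toNat : Int))
      = (PySem.List.pyRange 0 (t.length : Int) 1).foldl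
        (fun ret j => ret + (if PySem.Int.mod j 2 = 1 then -(pvCode (PySem.List.pyGetD t j ' '))
                             else pvCode (PySem.List.pyGetD t j ' '))) ((c0.toNat : Int)) := by
    rw [hlen]
    apply PySem.List.foldl_congr_mem
    intro acc j hj
    rw [PySem.List.mem_pyRange_one] at hj
    have hordeq : ordAtA login (j + 1) = pvCode (PySem.List.pyGetD t j ' ') := by
      unfold ordAtA
      have hj1 : (j + 1) = ((j.toNat + 1 : Nat) : Int) := by omega
      have hjn : j = ((j.toNat : Nat) : Int) := by omega
      rw [hj1, PySem.Str.pyGet?_natCast, hlt, hjn, PySem.List.pyGetD_natCast]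
      have hjt : j.toNat < t.length := by omega
      rw [show ((j.toNat : Int)).toNat = j.toNat by omega]
      simp [List.getElem?_cons_succ, List.getElem?_eq_getElem hjt, pvCode, List.getD]
    rw [hordeq]
    split_ifs <;> ring
  rw [hbody]
  -- turn the additive fold into a sum over the enumeration
  have hfold := PySem.List.foldl_add
    (PySem.List.pyRange 0 (t.length : Int) 1)
    (fun j => (if PySem.Int.mod j 2 = 1 then -(pvCode (PySem.List.pyGetD t j ' '))
               else pvCode (PySem.List.pyGetD t j ' ')))
    ((c0.toNat : Int))
  rw [hfold]
  have henum : (PySem.List.pyRange 0 (t.length : Int) 1).map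
      (fun j => (if PySem.Int.mod j 2 = 1 then -(pvCode (PySem.List.pyGetD t j ' '))
                 else pvCode (PySem.List.pyGetD t j ' ')))
      = (PySem.List.enumerate t 0).map
        (fun p => if PySem.Int.mod p.1 2 = 1 then -pvCode p.2 else pvCode p.2) := by
    rw [PySem.List.enumerate_eq_map_pyRange (d := ' '), List.map_map]
    rfl
  rw [henum, pvEnumSum t 0]
  have h0 : PySem.Int.mod 0 2 = 0 := by decide
  rw [if_neg (by rw [h0]; decide)]
  have hc : (fun c : Char => ((c.toNat : Int))) = pvCode := rfl
  rw [hc]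
  linarith [pvEoSum t]
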